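-- pv_equiv track=rewrite | github.com/erthtry-io/erthtry.io_5 | main.py | attributes_counter
-- ===== SOURCE A (Python) =====
-- import heapq
-- from collections import defaultdict
--
-- def attributes_counter(key, column, mode, bound):
--     """
--     Функция для фильтрации и сортировки значений по ключу в столбце dataframe.
--
--     Аргументы:
--     - key: ключ для фильтрации и сортировки значений
--     - column: столбец данных, содержащий словари
--     - mode: режим вывода ('count' для значений, встречающихся больше bound раз, 'top' для топ bound самых часто встречаемых значений)
--     - bound: количество значений в режиме
--
--     Возвращает:
--     - filtered_values: отфильтрованный и отсортированный список значений
--     """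
--
--     key_counts = defaultdict(int)
--
--     for line in column:
--         if line is not None and key in line:
--             value = line[key][0]  # Получаем значение по ключу из списка значений
--             key_counts[value] += 1
--
--     if mode == 'count':
--         filtered_values = [value for value, count in key_counts.items() if count > bound]
--     elif mode == 'top':
--         filtered_values = heapq.nlargest(bound, key_counts, key=key_counts.get)
--     else:
--         raise ValueError("Недопустимый режим вывода. Допустимые значения: 'count' и 'top'.")
--
--     return filtered_values
-- ===== SOURCE B (Python) =====
-- from collections import Counter
--
-- def attributes_counter(key, column, mode, bound):
--     if mode not in ('count', 'top'):
--         raise ValueError("Недопустимый режим вывода. Допустимые значения: 'count' и 'top'.")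
--     counts = Counter(line[key][0] for line in column if line is not None and key in line)
--     if mode == 'count':
--         return [value for value in counts if counts[value] > bound]
--     return sorted(counts, key=counts.__getitem__, reverse=True)[:max(bound, 0)]
-- ===== Notes on version B (the rewrite author's own statement) =====
-- stated objective: simpler
-- what changed: B validates the mode up front, builds the counts with a Counter over a filtered generator expression instead of an explicit guarded loop over a defaultdict, and selects the top-bound values by a full stable sort with a clamped slice instead of heapq.nlargest partial heap selection.
import Mathlib
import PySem

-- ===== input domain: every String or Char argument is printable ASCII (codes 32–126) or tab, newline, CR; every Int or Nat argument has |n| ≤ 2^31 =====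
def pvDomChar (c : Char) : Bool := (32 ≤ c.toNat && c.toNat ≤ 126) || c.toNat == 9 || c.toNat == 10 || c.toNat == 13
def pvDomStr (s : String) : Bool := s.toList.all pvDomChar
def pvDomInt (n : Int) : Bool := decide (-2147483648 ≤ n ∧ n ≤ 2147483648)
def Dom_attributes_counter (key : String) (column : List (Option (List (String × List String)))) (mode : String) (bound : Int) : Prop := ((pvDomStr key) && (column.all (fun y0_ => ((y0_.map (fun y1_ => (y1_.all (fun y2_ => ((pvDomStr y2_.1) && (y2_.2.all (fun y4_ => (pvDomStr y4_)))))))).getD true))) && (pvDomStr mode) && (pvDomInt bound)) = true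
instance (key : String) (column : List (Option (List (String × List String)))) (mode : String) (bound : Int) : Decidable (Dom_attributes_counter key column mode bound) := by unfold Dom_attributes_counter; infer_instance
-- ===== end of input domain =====

-- B replaces heapq.nlargest partial-selection with a full stable sort + clamped slice and builds
-- the counts from a Counter over a filtered generator instead of an explicit guarded loop (objective: simpler).


-- ===== PORT A =====
-- the counting loop: skip None, skip lines without key, count line[key][0]
-- (line[key][0] uses pyGetD with default "" — on Pre_ the value list is nonempty so this is exact)
def attributes_counter (key : String) (column : List (Option (List (String × List String)))) (mode : String) (bound : Int) : List String :=
  let key_counts : PySem.Dict String Int :=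
    column.foldl (fun d line =>
      match line with
      | none => d
      | some l =>
        match List.lookup key l with
        | none => d
        | some vs => d.modify (PySem.List.pyGetD vs 0 "") 0 (· + 1)) PySem.Dict.empty
  if mode = "count" then
    (key_counts.items.filter (fun p => decide (bound < p.2))).map (·.1)
  else if mode = "top" then
    -- heapq.nlargest(bound, d, key=d.get) = sorted(d, key=d.get, reverse=True)[:bound], [] for bound ≤ 0
    if bound ≤ 0 then []
    else (PySem.List.sorted key_counts.keys (fun k => key_counts.getD k 0) true).take bound.toNat
  else []  -- ValueError in Python: excluded by Pre_

-- ===== PORT B =====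
def attributes_counter_alt (key : String) (column : List (Option (List (String × List String)))) (mode : String) (bound : Int) : List String :=
  if mode ≠ "count" ∧ mode ≠ "top" then []  -- ValueError in Python: excluded by Pre_
  else
    -- Counter(line[key][0] for line in column if line is not None and key in line)
    let values : List String :=
      column.filterMap (fun line =>
        line.bind (fun l => (List.lookup key l).bind (fun vs => PySem.List.pyGet? vs 0)))
    let counts := PySem.Dict.counter values
    if mode = "count" then
      counts.keys.filter (fun v => decide (bound < counts.getD v 0))
    else
      (PySem.List.sorted counts.keys (fun k => counts.getD k 0) true).take (max bound 0).toNat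

-- ===== PRECONDITION & SPEC =====
-- Pre_ excludes exactly the inputs where A raises: a mode other than 'count'/'top' (ValueError),
-- and any counted line whose value list for key is empty (IndexError on line[key][0]).
def Pre_attributes_counter (key : String) (column : List (Option (List (String × List String)))) (mode : String) (bound : Int) : Prop :=
  (mode = "count" ∨ mode = "top") ∧
  column.all (fun line =>
    match line with
    | none => true
    | some l =>
      match List.lookup key l with
      | none => true
      | some vs => !vs.isEmpty) = true
instance (key : String) (column : List (Option (List (String × List String)))) (mode : String) (bound : Int) : Decidable (Pre_attributes_counter key column mode bound) := by unfold Pre_attributes_counter; infer_instance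

def pvWitness_attributes_counter : String × (List (Option (List (String × List String)))) × String × Int :=
  ("k", [some [("k", ["a"])], none, some [("j", ["b"])]], "count", 0)

def Spec_attributes_counter (key : String) (column : List (Option (List (String × List String)))) (mode : String) (bound : Int) (out : List String) : Prop := out = attributes_counter_alt key column mode bound
instance (key : String) (column : List (Option (List (String × List String)))) (mode : String) (bound : Int) (out : List String) : Decidable (Spec_attributes_counter key column mode bound out) := by unfold Spec_attributes_counter; infer_instance

-- ===== CLAIM (what is proved, stated in full; the proofs are below) =====
def Claim_equal_attributes_counter : Prop := ∀ (key : String) (column : List (Option (List (String × List String)))) (mode : String) (bound : Int), Dom_attributes_counter key column mode bound → Pre_attributes_counter key column mode bound → Spec_attributes_counter key column mode bound (attributes_counter key column mode bound)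

-- ===== LEMMAS AND PROOFS =====

-- On Pre_-valid columns A's guarded counting loop equals the Counter fold over B's extracted values.
theorem counts_eq (key : String) (column : List (Option (List (String × List String))))
    (h : column.all (fun line =>
      match line with
      | none => true
      | some l =>
        match List.lookup key l with
        | none => true
        | some vs => !vs.isEmpty) = true)
    (d : PySem.Dict String Int) :
    column.foldl (fun d line =>
      match line with
      | none => d
      | some l =>
        match List.lookup key l with
        | none => d
        | some vs => d.modify (PySem.List.pyGetD vs 0 "") 0 (· + 1)) d
    = (column.filterMap (fun line =>
        line.bind (fun l => (List.lookup key l).bind (fun vs => PySem.List.pyGet? vs 0)))).foldl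
        (fun d x => d.modify x 0 (· + 1)) d := by
  induction column generalizing d with
  | nil => rfl
  | cons line rest ih =>
    simp only [List.all_cons, Bool.and_eq_true] at h
    obtain ⟨h1, h2⟩ := h
    cases line with
    | none => simpa using ih h2 d
    | some l =>
      cases hl : List.lookup key l with
      | none => simp [List.foldl_cons, hl, ih h2 d]
      | some vs =>
        replace h1 : (!vs.isEmpty) = true := by simpa [hl] using h1
        cases vs with
        | nil => simp at h1
        | cons v t =>
          have hA : PySem.List.pyGetD (v :: t) 0 "" = v := by simp [PySem.List.pyGetD]
          have hB : PySem.List.pyGet? (v :: t) 0 = some v := by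
            simp [PySem.List.pyGet?, PySem.List.pyIdx?]
          simp only [List.foldl_cons, List.filterMap_cons, hl, hA, hB, Option.bind_some]
          exact ih h2 _

-- ===== VERDICT (by name: the statement is the Claim_ definition above) =====
theorem attributes_counter_spec : Claim_equal_attributes_counter := by
  intro key column mode bound _ hpre
  obtain ⟨hmode, hcol⟩ := hpre
  unfold Spec_attributes_counter attributes_counter attributes_counter_alt
  rw [counts_eq key column hcol, ← PySem.Dict.counter_eq_foldl]
  rcases hmode with hm | hm <;> subst hm
  · simp [PySem.Dict.items_eq_map_keys _ (PySem.Dict.nodup_keys_counter _) 0,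
      List.filter_map, Function.comp_def]
  · by_cases hb : bound ≤ 0
    · simp [hb]
    · have h0 : (max bound 0).toNat = bound.toNat := by omega
      simp [hb, h0]
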